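-- pv_equiv track=rewrite | github.com/Shreyahererai/WiproL1 | Q3.py | Xsorting
-- ===== SOURCE A (Python) =====
-- def Xsorting(inputs):
--     l1=[]
--     l2=[]
--     for i in inputs:
--         if(i[0]=='x' or i[0]=='X'):
--             l1.append(i)
--         else:
--             l2.append(i)
--     return sorted(l1)+sorted(l2)
-- ===== SOURCE B (Python) =====
-- def Xsorting(inputs):
--     return sorted(inputs, key=lambda w: (0 if w[0] in ('x', 'X') else 1, w))
-- ===== Notes on version B (the rewrite author's own statement) =====
-- stated objective: idiomatic
-- what changed: Replaces the explicit partition loop into two lists plus two sorts with a single sorted() call on a composite key (group-rank, word), which reproduces sorted(l1)+sorted(l2) exactly.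
import Mathlib
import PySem

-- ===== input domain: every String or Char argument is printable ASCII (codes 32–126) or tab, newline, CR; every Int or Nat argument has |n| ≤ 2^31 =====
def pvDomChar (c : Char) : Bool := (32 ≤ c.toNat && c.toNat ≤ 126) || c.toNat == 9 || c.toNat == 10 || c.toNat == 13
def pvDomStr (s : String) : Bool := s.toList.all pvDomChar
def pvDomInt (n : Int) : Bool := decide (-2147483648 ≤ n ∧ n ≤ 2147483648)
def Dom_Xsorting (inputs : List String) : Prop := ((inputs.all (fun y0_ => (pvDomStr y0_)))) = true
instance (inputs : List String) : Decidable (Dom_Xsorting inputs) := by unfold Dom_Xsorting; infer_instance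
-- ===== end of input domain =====

-- ===== PORT A =====
-- B replaces A's partition-into-two-lists-plus-two-sorts with one sorted() call on a
-- composite key (group-rank, word); same cost, more idiomatic.
def Xsorting (inputs : List String) : List String :=
  let p := inputs.foldl
    (fun (acc : List String × List String) i =>
      if PySem.Str.pyGet? i 0 = some 'x' ∨ PySem.Str.pyGet? i 0 = some 'X' then
        (acc.1 ++ [i], acc.2)
      else
        (acc.1, acc.2 ++ [i]))
    ([], [])
  PySem.List.sorted p.1 (fun x => x) ++ PySem.List.sorted p.2 (fun x => x)

-- ===== PORT B =====
-- first component of B's tuple key: 0 if w[0] in ('x','X') else 1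
def xRank (w : String) : Int :=
  if PySem.Str.pyGet? w 0 = some 'x' ∨ PySem.Str.pyGet? w 0 = some 'X' then 0 else 1

def Xsorting_alt (inputs : List String) : List String :=
  PySem.List.sorted inputs (fun w => toLex (xRank w, w))

-- ===== PRECONDITION & SPEC =====
-- Pre_ excludes lists containing the empty string, on which both A and B raise IndexError at w[0].
def Pre_Xsorting (inputs : List String) : Prop := ∀ s ∈ inputs, s ≠ ""
instance (inputs : List String) : Decidable (Pre_Xsorting inputs) := by unfold Pre_Xsorting; infer_instance

def pvWitness_Xsorting : List String := ["xyz", "apple", "Xen", "bee", "xAa"]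

def Spec_Xsorting (inputs : List String) (out : List String) : Prop := out = Xsorting_alt inputs
instance (inputs : List String) (out : List String) : Decidable (Spec_Xsorting inputs out) := by unfold Spec_Xsorting; infer_instance

-- ===== CLAIM (what is proved, stated in full; the proofs are below) =====
def Claim_equal_Xsorting : Prop := ∀ (inputs : List String), Dom_Xsorting inputs → Pre_Xsorting inputs → Spec_Xsorting inputs (Xsorting inputs)

-- ===== LEMMAS AND PROOFS =====

-- the Bool form of A's branch test
def xTest (w : String) : Bool :=
  decide (PySem.Str.pyGet? w 0 = some 'x' ∨ PySem.Str.pyGet? w 0 = some 'X')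

lemma xRank_of_test {w : String} (h : xTest w = true) : xRank w = 0 := by
  simp [xTest] at h; simp [xRank, h]

lemma xRank_of_not_test {w : String} (h : xTest w = false) : xRank w = 1 := by
  simp [xTest] at h
  simp [xRank, h.1, h.2]

-- A's loop builds exactly (filter xTest, filter !xTest)
lemma Xsorting_foldl_eq (inputs : List String) (acc1 acc2 : List String) :
    inputs.foldl
      (fun (acc : List String × List String) i =>
        if PySem.Str.pyGet? i 0 = some 'x' ∨ PySem.Str.pyGet? i 0 = some 'X' then
          (acc.1 ++ [i], acc.2)
        else
          (acc.1, acc.2 ++ [i]))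
      (acc1, acc2)
    = (acc1 ++ inputs.filter xTest, acc2 ++ inputs.filter (fun w => !xTest w)) := by
  induction inputs generalizing acc1 acc2 with
  | nil => simp
  | cons i t ih =>
    simp only [List.foldl_cons]
    by_cases h : PySem.Str.pyGet? i 0 = some 'x' ∨ PySem.Str.pyGet? i 0 = some 'X'
    · have hx : xTest i = true := decide_eq_true h
      rw [if_pos h, ih]
      simp [hx]
    · have hx : xTest i = false := decide_eq_false h
      rw [if_neg h, ih]
      simp [hx]

-- the composite key is injective (its second component is the word itself)
lemma xKey_injective : Function.Injective (fun w : String => toLex (xRank w, w)) := by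
  intro a b h
  have := congrArg (fun x => (ofLex x).2) h
  simpa using this

theorem Xsorting_spec : Claim_equal_Xsorting := by
  intro inputs _ _
  unfold Spec_Xsorting Xsorting Xsorting_alt
  rw [Xsorting_foldl_eq]
  simp only [List.nil_append]
  refine (PySem.List.eq_of_perm_of_pairwise_le_of_injective
    (fun w : String => toLex (xRank w, w)) xKey_injective ?_ ?_ ?_).symm
  · -- both sides are permutations of inputs
    refine (PySem.List.sorted_perm inputs _ _).trans ?_
    refine ((List.filter_append_perm xTest inputs).symm.trans ?_)
    exact ((List.Perm.append (PySem.List.sorted_perm _ _ _) (PySem.List.sorted_perm _ _ _))).symm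
  · exact PySem.List.sorted_pairwise inputs _
  · -- the concatenation of the two sorted groups is pairwise ≤ under the composite key
    rw [List.pairwise_append]
    refine ⟨?_, ?_, ?_⟩
    · refine (PySem.List.sorted_pairwise _ (fun x : String => x)).imp_of_mem ?_
      intro a b ha hb hab
      have ha' : xRank a = 0 := xRank_of_test (List.of_mem_filter
        ((PySem.List.mem_sorted _ _ _ _).1 ha))
      have hb' : xRank b = 0 := xRank_of_test (List.of_mem_filter
        ((PySem.List.mem_sorted _ _ _ _).1 hb))
      rw [Prod.Lex.le_iff]
      exact Or.inr ⟨by simp [ha', hb'], hab⟩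
    · refine (PySem.List.sorted_pairwise _ (fun x : String => x)).imp_of_mem ?_
      intro a b ha hb hab
      have ha' : xRank a = 1 := xRank_of_not_test (by
        simpa using List.of_mem_filter ((PySem.List.mem_sorted _ _ _ _).1 ha))
      have hb' : xRank b = 1 := xRank_of_not_test (by
        simpa using List.of_mem_filter ((PySem.List.mem_sorted _ _ _ _).1 hb))
      rw [Prod.Lex.le_iff]
      exact Or.inr ⟨by simp [ha', hb'], hab⟩
    · intro a ha b hb
      have ha' : xRank a = 0 := xRank_of_test (List.of_mem_filter
        ((PySem.List.mem_sorted _ _ _ _).1 ha))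
      have hb' : xRank b = 1 := xRank_of_not_test (by
        simpa using List.of_mem_filter ((PySem.List.mem_sorted _ _ _ _).1 hb))
      rw [Prod.Lex.le_iff]
      exact Or.inl (by simp [ha', hb'])
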